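-- pv_equiv track=rewrite | github.com/koushik-shetty/foobar-with-google | 03_en-route-salute/solution.py | solution
-- ===== SOURCE A (Python) =====
-- def solution(str):
--     rAngle, lAngle, total = 0,0,0
--     for char in str:
--         if char == ">":
--             rAngle += 1
--         elif char == "<":
--             total += rAngle
--
--
--     return total * 2
-- ===== SOURCE B (Python) =====
-- def solution(str):
--     # B: two passes — build a prefix table of '>' counts, then sum it at '<' positions.
--     prefix = []
--     c = 0
--     for ch in str:
--         prefix.append(c)
--         if ch == ">":
--             c += 1
--     return 2 * sum(prefix[i] for i, ch in enumerate(str) if ch == "<")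
-- ===== Notes on version B (the rewrite author's own statement) =====
-- stated objective: alternative
-- what changed: Replaced the single accumulating pass with a two-pass prefix-table scheme: first build a list of running '>' counts, then sum the table entries at '<' positions and double the sum.
import Mathlib
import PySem

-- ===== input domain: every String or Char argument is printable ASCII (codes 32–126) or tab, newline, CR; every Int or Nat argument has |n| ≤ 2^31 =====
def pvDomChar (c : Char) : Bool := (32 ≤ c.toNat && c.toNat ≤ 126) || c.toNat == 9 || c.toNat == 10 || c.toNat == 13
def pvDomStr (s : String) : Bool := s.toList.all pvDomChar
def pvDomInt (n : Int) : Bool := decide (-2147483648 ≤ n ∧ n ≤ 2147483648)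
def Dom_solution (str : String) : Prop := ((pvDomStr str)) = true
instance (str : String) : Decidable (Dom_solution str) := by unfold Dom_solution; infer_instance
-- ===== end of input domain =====

-- B replaces A's single accumulating pass by a prefix table of '>' counts summed at '<' positions; alternative decomposition, same cost.

-- ===== PORT A =====
-- A's for-loop over the characters with state (rAngle, total); lAngle is unused in A.
def solutionLoopA : List Char → Int → Int → Int
  | [], _, total => total
  | c :: cs, rAngle, total =>
    if c = '>' then solutionLoopA cs (rAngle + 1) total
    else if c = '<' then solutionLoopA cs rAngle (total + rAngle)
    else solutionLoopA cs rAngle total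

def solution (str : String) : Int := solutionLoopA str.toList 0 0 * 2

-- ===== PORT B =====
-- first pass: prefix[i] = number of '>' before index i
def buildPrefix : List Char → Int → List Int
  | [], _ => []
  | c :: cs, acc => acc :: buildPrefix cs (if c = '>' then acc + 1 else acc)

-- second pass: sum the prefix entries at '<' positions
def sumAtLt : List Char → List Int → Int
  | c :: cs, p :: ps => (if c = '<' then p else 0) + sumAtLt cs ps
  | _, _ => 0

def solution_alt (str : String) : Int := 2 * sumAtLt str.toList (buildPrefix str.toList 0)

-- ===== PRECONDITION & SPEC =====
def Spec_solution (str : String) (out : Int) : Prop := out = solution_alt str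
instance (str : String) (out : Int) : Decidable (Spec_solution str out) := by unfold Spec_solution; infer_instance

-- ===== CLAIM (what is proved, stated in full; the proofs are below) =====
def Claim_equal_solution : Prop := ∀ (str : String), Dom_solution str → Spec_solution str (solution str)

-- ===== LEMMAS AND PROOFS =====
theorem solutionLoopA_eq (cs : List Char) : ∀ (r t : Int),
    solutionLoopA cs r t = t + sumAtLt cs (buildPrefix cs r) := by
  induction cs with
  | nil => intro r t; simp [solutionLoopA, sumAtLt]
  | cons c cs ih =>
    intro r t
    by_cases hgt : c = '>'
    · simp [solutionLoopA, buildPrefix, sumAtLt, hgt, ih]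
    · by_cases hlt : c = '<'
      · simp [solutionLoopA, buildPrefix, sumAtLt, hlt, ih]
        ring
      · simp [solutionLoopA, buildPrefix, sumAtLt, hgt, hlt, ih]

-- ===== VERDICT (by name: the statement is the Claim_ definition above) =====
theorem solution_spec : Claim_equal_solution := by
  intro str _
  unfold Spec_solution solution solution_alt
  rw [solutionLoopA_eq]
  ring
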